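-- pv_equiv track=rewrite | github.com/YHWriteCode/EconRAGent | kg_agent/crawler/scheduler.py | _domain_match_count
-- ===== SOURCE A (Python) =====
-- def _domain_match_count(domain: str, rules: list[str]) -> int:
--     normalized_domain = (domain or "").strip().lower().strip(".")
--     if not normalized_domain:
--         return 0
--     return sum(
--         1
--         for rule in rules
--         if rule
--         and (
--             normalized_domain == rule
--             or normalized_domain.endswith(f".{rule}")
--         )
--     )
-- ===== SOURCE B (Python) =====
-- def _domain_match_count(domain: str, rules: list[str]) -> int:
--     normalized = (domain or "").strip().lower().strip(".")
--     if not normalized: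
--         return 0
--     # set of the full domain and every tail that follows a dot:
--     # exactly the strings that satisfy '==' or endswith('.'+rule)
--     suffixes = {normalized}
--     for i, ch in enumerate(normalized):
--         if ch == ".":
--             suffixes.add(normalized[i + 1:])
--     return sum(1 for rule in rules if rule in suffixes)
-- ===== Notes on version B (the rewrite author's own statement) =====
-- stated objective: alternative
-- what changed: B builds a hash set of the normalized domain's dot-suffixes once (one pass over the domain) and counts rules by set membership, instead of A's per-rule string equality / endswith('.'+rule) tests.
import Mathlib
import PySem

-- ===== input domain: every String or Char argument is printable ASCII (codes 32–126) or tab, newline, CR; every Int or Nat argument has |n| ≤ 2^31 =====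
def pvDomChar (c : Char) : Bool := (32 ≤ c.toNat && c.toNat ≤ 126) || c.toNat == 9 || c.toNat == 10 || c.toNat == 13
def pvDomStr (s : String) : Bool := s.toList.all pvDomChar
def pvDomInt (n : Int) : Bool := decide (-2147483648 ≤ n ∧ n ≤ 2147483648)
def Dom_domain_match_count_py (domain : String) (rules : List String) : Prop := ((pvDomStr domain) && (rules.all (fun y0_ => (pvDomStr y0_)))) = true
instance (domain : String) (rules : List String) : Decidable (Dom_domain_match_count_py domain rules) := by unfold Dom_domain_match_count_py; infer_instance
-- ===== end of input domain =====

-- B replaces A's per-rule equality/endswith tests by a set of the domain's dot-suffixes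
-- built once, then counts rules by membership (objective: alternative data structure, same result).

-- ===== PORT A =====
-- '(domain or "")' equals domain for every string (falsy only when ""), so it is ported as domain.
def domain_match_count_py (domain : String) (rules : List String) : Int :=
  let normalized_domain := PySem.Str.stripChars (PySem.Str.lower (PySem.Str.strip domain)) "."
  if normalized_domain = "" then 0
  else
    rules.foldl
      (fun acc rule =>
        if rule ≠ "" ∧ (normalized_domain = rule ∨
            PySem.Str.endswith normalized_domain ("." ++ rule) = true)
        then acc + 1 else acc) 0

-- ===== PORT B =====
def domain_match_count_py_alt (domain : String) (rules : List String) : Int :=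
  let normalized := PySem.Str.stripChars (PySem.Str.lower (PySem.Str.strip domain)) "."
  if normalized = "" then 0
  else
    let suffixes : PySem.Set String :=
      (PySem.List.enumerate normalized.toList).foldl
        (fun s p => if p.2 = '.' then PySem.Set.add s (PySem.Str.slice normalized (some (p.1 + 1)) none) else s)
        (PySem.Set.add PySem.Set.empty normalized)
    rules.foldl (fun acc rule => if PySem.Set.contains suffixes rule = true then acc + 1 else acc) 0

-- ===== PRECONDITION & SPEC =====
def Spec_domain_match_count_py (domain : String) (rules : List String) (out : Int) : Prop := out = domain_match_count_py_alt domain rules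
instance (domain : String) (rules : List String) (out : Int) : Decidable (Spec_domain_match_count_py domain rules out) := by unfold Spec_domain_match_count_py; infer_instance

-- ===== CLAIM (what is proved, stated in full; the proofs are below) =====
def Claim_equal_domain_match_count_py : Prop := ∀ (domain : String) (rules : List String), Dom_domain_match_count_py domain rules → Spec_domain_match_count_py domain rules (domain_match_count_py domain rules)

-- ===== LEMMAS AND PROOFS =====

-- membership in a fold that conditionally adds to a PySem.Set
theorem pv_mem_foldl_ite_add {α β : Type} [BEq β] [LawfulBEq β] (l : List α) (c : α → Prop)
    [DecidablePred c] (f : α → β) (s0 : PySem.Set β) (x : β) :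
    x ∈ l.foldl (fun s a => if c a then PySem.Set.add s (f a) else s) s0 ↔
      x ∈ s0 ∨ ∃ a ∈ l, c a ∧ x = f a := by
  induction l generalizing s0 with
  | nil => simp
  | cons a t ih =>
    simp only [List.foldl_cons]
    by_cases h : c a
    · simp only [if_pos h]
      rw [ih]
      simp only [PySem.Set.mem_add, List.mem_cons]
      constructor
      · rintro (⟨hx | hx⟩ | ⟨b, hb, hc, hx⟩)
        · exact Or.inl hx
        · exact Or.inr ⟨a, Or.inl rfl, h, hx⟩
        · exact Or.inr ⟨b, Or.inr hb, hc, hx⟩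
      · rintro (hx | ⟨b, (rfl | hb), hc, hx⟩)
        · exact Or.inl (Or.inl hx)
        · exact Or.inl (Or.inr hx)
        · exact Or.inr ⟨b, hb, hc, hx⟩
    · simp only [if_neg h]
      rw [ih]
      simp only [List.mem_cons]
      constructor
      · rintro (hx | ⟨b, hb, hc, hx⟩)
        · exact Or.inl hx
        · exact Or.inr ⟨b, Or.inr hb, hc, hx⟩
      · rintro (hx | ⟨b, (rfl | hb), hc, hx⟩)
        · exact Or.inl hx
        · exact absurd hc h
        · exact Or.inr ⟨b, hb, hc, hx⟩

-- membership in PySem.List.enumerate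
theorem pv_mem_enumerate {α : Type} (xs : List α) (k : Int) (p : Int × α) :
    p ∈ PySem.List.enumerate xs k ↔
      ∃ j : Nat, ∃ h : j < xs.length, p.1 = k + j ∧ p.2 = xs[j] := by
  induction xs generalizing k with
  | nil => simp [PySem.List.enumerate]
  | cons a t ih =>
    simp only [PySem.List.enumerate, List.mem_cons, ih]
    constructor
    · rintro (rfl | ⟨j, hj, h1, h2⟩)
      · exact ⟨0, by simp, by simp, by simp⟩
      · refine ⟨j + 1, by simp only [List.length_cons]; omega, ?_, by simpa using h2⟩
        push_cast at h1 ⊢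
        omega
    · rintro ⟨j, hj, h1, h2⟩
      cases j with
      | zero =>
        left
        obtain ⟨p1, p2⟩ := p
        simp_all
      | succ j =>
        right
        simp only [List.length_cons] at hj
        push_cast at h1
        refine ⟨j, by omega, by omega, by simpa using h2⟩

-- the last character of stripChars is never one of the stripped characters
theorem pv_stripChars_getLast (s chars : List Char) (h : PySem.Chars.stripChars s chars ≠ []) :
    chars.contains ((PySem.Chars.stripChars s chars).getLast h) = false := by
  simp only [PySem.Chars.stripChars] at h ⊢
  rw [List.getLast_reverse]
  exact List.head_dropWhile_not _ _

-- '.'-prefixed suffix characterization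
theorem pv_dot_suffix_iff (cs rs : List Char) :
    ('.' :: rs) <:+ cs ↔ ∃ j : Nat, ∃ h : j < cs.length, cs[j] = '.' ∧ rs = cs.drop (j + 1) := by
  constructor
  · rintro ⟨pre, rfl⟩
    refine ⟨pre.length, by simp, by simp, ?_⟩
    have h1 : (pre ++ '.' :: rs).drop pre.length = '.' :: rs := List.drop_left
    have h2 : (pre ++ '.' :: rs).drop (pre.length + 1) = ((pre ++ '.' :: rs).drop pre.length).drop 1 := by
      rw [List.drop_drop]
    rw [h2, h1]
    rfl
  · rintro ⟨j, hj, hdot, rfl⟩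
    have h1 : cs.drop j = '.' :: cs.drop (j + 1) := by
      rw [← hdot]; exact (List.getElem_cons_drop hj).symm
    rw [← h1]
    exact List.drop_suffix j cs

-- getLast? form of pv_stripChars_getLast
theorem pv_stripChars_getLast? (s chars : List Char) (c : Char)
    (h : (PySem.Chars.stripChars s chars).getLast? = some c) : chars.contains c = false := by
  have hne : PySem.Chars.stripChars s chars ≠ [] := by
    intro hnil; rw [hnil] at h; simp at h
  rw [List.getLast?_eq_some_getLast hne, Option.some_inj] at h
  rw [← h]
  exact pv_stripChars_getLast s chars hne

-- toList of the suffix slice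
theorem pv_toList_slice_suffix (nd : String) (j : Nat) :
    (PySem.Str.slice nd (some ((j : Int) + 1)) none).toList = nd.toList.drop (j + 1) := by
  rw [PySem.Str.toList_slice, PySem.Chars.slice_eq_listSlice,
    show ((j : Int) + 1) = ((j + 1 : Nat) : Int) by push_cast; ring,
    PySem.List.slice_from_natCast]

-- per-rule: A's match test agrees with membership in B's suffix set
theorem pv_rule_iff (nd rule : String) (hne : nd ≠ "")
    (hlast : ∀ c, nd.toList.getLast? = some c → c ≠ '.') :
    (rule ≠ "" ∧ (nd = rule ∨ PySem.Str.endswith nd ("." ++ rule) = true)) ↔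
      rule ∈ (PySem.List.enumerate nd.toList 0).foldl
        (fun s p => if p.2 = '.' then PySem.Set.add s (PySem.Str.slice nd (some (p.1 + 1)) none) else s)
        (PySem.Set.add PySem.Set.empty nd) := by
  rw [pv_mem_foldl_ite_add (c := fun p : Int × Char => p.2 = '.')]
  have hcsne : nd.toList ≠ [] := by
    intro hnil; exact hne (String.toList_inj.mp (by simp [hnil]))
  have hdotrule : ("." ++ rule).toList = '.' :: rule.toList := by
    rw [String.toList_append]; rfl
  have hend : PySem.Str.endswith nd ("." ++ rule) = true ↔ ('.' :: rule.toList) <:+ nd.toList := by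
    rw [PySem.Str.endswith_eq, ← hdotrule, PySem.Chars.endswith_iff]
  constructor
  · rintro ⟨hrne, rfl | hew⟩
    · left; simp
    · right
      rw [hend, pv_dot_suffix_iff] at hew
      obtain ⟨j, hj, hdot, hdrop⟩ := hew
      refine ⟨((j : Int), '.'), ?_, rfl, ?_⟩
      · exact (pv_mem_enumerate _ _ _).mpr ⟨j, hj, by simp, hdot.symm⟩
      · exact String.toList_inj.mp (by rw [pv_toList_slice_suffix, ← hdrop])
  · rintro (hx | ⟨p, hp, hdot, hx⟩)
    · have : rule = nd := by simpa [PySem.Set.mem_add] using hx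
      exact ⟨this ▸ hne, Or.inl this.symm⟩
    · obtain ⟨j, hj, hp1, hp2⟩ := (pv_mem_enumerate _ _ _).mp hp
      have hdotj : nd.toList[j] = '.' := by rw [← hp2]; exact hdot
      have hp1' : p.1 = (j : Int) := by omega
      rw [hp1'] at hx
      have hrl : rule.toList = nd.toList.drop (j + 1) := by
        rw [hx, pv_toList_slice_suffix]
      have hrne : rule ≠ "" := by
        intro hnil
        have hdr : nd.toList.drop (j + 1) = [] := by rw [← hrl, hnil]; rfl
        have hlen : nd.toList.length ≤ j + 1 := by
          simpa [List.drop_eq_nil_iff] using hdr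
        have hjlen : j = nd.toList.length - 1 := by omega
        have : nd.toList.getLast? = some '.' := by
          rw [List.getLast?_eq_some_getLast hcsne, List.getLast_eq_getElem]
          exact congrArg some (hjlen ▸ hdotj)
        exact hlast '.' this rfl
      exact ⟨hrne, Or.inr (hend.mpr ((pv_dot_suffix_iff _ _).mpr ⟨j, hj, hdotj, hrl⟩))⟩

-- ===== VERDICT (by name: the statement is the Claim_ definition above) =====
set_option maxHeartbeats 1000000 in
theorem domain_match_count_py_spec : Claim_equal_domain_match_count_py := by
  intro domain rules _
  unfold Spec_domain_match_count_py domain_match_count_py domain_match_count_py_alt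
  simp only []
  by_cases h : PySem.Str.stripChars (PySem.Str.lower (PySem.Str.strip domain)) "." = ""
  · rw [if_pos h, if_pos h]
  · rw [if_neg h, if_neg h]
    refine PySem.List.foldl_congr_mem rules _ _ 0 ?_
    intro acc rule _
    have hlast : ∀ c,
        (PySem.Str.stripChars (PySem.Str.lower (PySem.Str.strip domain)) ".").toList.getLast? = some c → c ≠ '.' := by
      intro c hc hc'
      have hcont : (".".toList).contains c = false :=
        pv_stripChars_getLast? (PySem.Str.lower (PySem.Str.strip domain)).toList ".".toList c
          (PySem.Str.toList_stripChars _ _ ▸ hc)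
      rw [hc'] at hcont
      simp at hcont
    rw [if_congr ((pv_rule_iff _ rule h hlast).trans (PySem.Set.contains_iff _ _).symm) rfl rfl]
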